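-- pv_equiv track=rewrite | github.com/ilnar-geekbrains/Test_11_18 | task_1.py | is_arrays_equal
-- ===== SOURCE A (Python) =====
-- def is_arrays_equal(arr1, arr2):
--     """Эта функция проверяет, если два массива равны.
--        Для простоты, проверяем списки с простыми типами данных.
--     """
--     if len(arr1) != len(arr2):
--         return False
--     for i in range(len(arr1)):
--         if arr1[i] != arr2[i]:
--             return False
--         if isinstance(arr1[i], list) and isinstance(arr2[i], list):
--             if not is_arrays_equal(arr1[i], arr2[i]):
--                 return False
--     return True
-- ===== SOURCE B (Python) =====
-- def is_arrays_equal(arr1, arr2):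
--     return len(arr1) == len(arr2) and all(x == y for x, y in zip(arr1, arr2))
-- ===== Notes on version B (the rewrite author's own statement) =====
-- stated objective: idiomatic
-- what changed: Replaced the index-driven loop with early returns (and its recursive nested-list branch) by a single length check combined with an all() over zip of the two lists.
import Mathlib
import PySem

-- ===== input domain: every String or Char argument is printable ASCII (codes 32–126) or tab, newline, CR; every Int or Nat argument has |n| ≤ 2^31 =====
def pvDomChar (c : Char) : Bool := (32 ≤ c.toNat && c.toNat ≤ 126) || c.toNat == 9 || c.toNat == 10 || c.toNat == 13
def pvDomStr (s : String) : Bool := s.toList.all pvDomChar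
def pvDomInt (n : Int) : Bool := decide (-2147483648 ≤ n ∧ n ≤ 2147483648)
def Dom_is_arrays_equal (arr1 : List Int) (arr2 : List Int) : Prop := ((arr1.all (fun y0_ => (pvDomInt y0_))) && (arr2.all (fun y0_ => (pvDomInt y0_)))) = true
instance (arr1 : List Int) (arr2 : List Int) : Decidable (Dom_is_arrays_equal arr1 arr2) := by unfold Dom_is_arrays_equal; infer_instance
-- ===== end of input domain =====

-- B replaces A's index loop with early returns by a length check plus all() over zip (idiomatic, same cost).
-- ===== PORT A =====
-- the 'for i in range(len(arr1))' loop; under the List Int domain isinstance(arr1[i], list)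
-- is always False, so A's nested-list branch is dead code and has no Lean counterpart
def pvLoopA (a b : List Int) (i : Nat) : Bool :=
  if i < a.length then
    if PySem.List.pyGet? a (i : Int) ≠ PySem.List.pyGet? b (i : Int) then false
    else pvLoopA a b (i + 1)
  else true
termination_by a.length - i

def is_arrays_equal (arr1 : List Int) (arr2 : List Int) : Bool :=
  if arr1.length ≠ arr2.length then false
  else pvLoopA arr1 arr2 0

-- ===== PORT B =====
def is_arrays_equal_alt (arr1 : List Int) (arr2 : List Int) : Bool :=
  arr1.length == arr2.length && (arr1.zip arr2).all (fun p => p.1 == p.2)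

-- ===== PRECONDITION & SPEC =====
def Spec_is_arrays_equal (arr1 : List Int) (arr2 : List Int) (out : Bool) : Prop := out = is_arrays_equal_alt arr1 arr2
instance (arr1 : List Int) (arr2 : List Int) (out : Bool) : Decidable (Spec_is_arrays_equal arr1 arr2 out) := by unfold Spec_is_arrays_equal; infer_instance

-- ===== CLAIM (what is proved, stated in full; the proofs are below) =====
def Claim_equal_is_arrays_equal : Prop := ∀ (arr1 : List Int) (arr2 : List Int), Dom_is_arrays_equal arr1 arr2 → Spec_is_arrays_equal arr1 arr2 (is_arrays_equal arr1 arr2)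

-- ===== LEMMAS AND PROOFS =====
theorem pvLoopA_eq (a b : List Int) (hlen : a.length = b.length) (n : Nat) : ∀ i, a.length - i = n →
    pvLoopA a b i = ((a.drop i).zip (b.drop i)).all (fun p => p.1 == p.2) := by
  induction n with
  | zero =>
    intro i h
    unfold pvLoopA
    have hi : ¬ i < a.length := by omega
    simp [hi, List.drop_eq_nil_of_le (by omega : a.length ≤ i)]
  | succ n ih =>
    intro i h
    unfold pvLoopA
    have hi : i < a.length := by omega
    simp only [hi, if_pos]
    rw [PySem.List.pyGet?_natCast, PySem.List.pyGet?_natCast]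
    rw [ih (i+1) (by omega)]
    by_cases hib : i < b.length
    · rw [List.getElem?_eq_getElem hi, List.getElem?_eq_getElem hib,
          List.drop_eq_getElem_cons hi, List.drop_eq_getElem_cons hib]
      simp only [List.zip_cons_cons, List.all_cons]
      by_cases he : a[i] = b[i] <;> simp [he]
    · omega

-- ===== VERDICT (by name: the statement is the Claim_ definition above) =====
theorem is_arrays_equal_spec : Claim_equal_is_arrays_equal := by
  intro arr1 arr2 _
  unfold Spec_is_arrays_equal is_arrays_equal is_arrays_equal_alt
  by_cases h : arr1.length = arr2.length
  · simp [h, pvLoopA_eq arr1 arr2 h arr1.length 0 (by omega)]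
  · simp [h]
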